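-- pv_equiv track=rewrite | github.com/sunghyunkang1993/BJAlgorithms | Sorting/3020.py | getnumObstacles
-- ===== SOURCE A (Python) =====
-- def binarysearchIndex(obstacles, target):
-- 	low = 0
-- 	high = len(obstacles) - 1
--
-- 	while low <= high:
-- 		mid = int((low + high) / 2)
-- 		if obstacles[mid] >= target:
-- 			high = mid - 1
-- 		else:
-- 			low = mid + 1
--
-- 	return low
--
-- def getnumObstacles(obstaclesTop, obstaclesBot, n, lengths):
-- 	minObstacles = lengths
-- 	numOccurences = 0
-- 	obstaclesTop.sort()
-- 	obstaclesBot.sort()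
--
-- 	for height in range(n):
-- 		numOccurencesTop = len(obstaclesTop) - binarysearchIndex(obstaclesTop, height+1)
-- 		numOccurencesBot = len(obstaclesBot) - binarysearchIndex(obstaclesBot, n-height)
-- 		totalObstacles = numOccurencesTop + numOccurencesBot
--
-- 		if totalObstacles == minObstacles:
-- 			numOccurences += 1
-- 		if totalObstacles < minObstacles:
-- 			minObstacles = totalObstacles
-- 			numOccurences = 1
--
-- 	return " ".join([str(minObstacles), str(numOccurences)])
-- ===== SOURCE B (Python) =====
-- def _heightCounts(obstacles, n):
-- 	# cnt[c] = number of obstacles whose height, clamped into [0, n], equals c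
-- 	cnt = [0] * (n + 1)
-- 	for v in obstacles:
-- 		c = 0 if v < 0 else (n if v > n else v)
-- 		cnt[c] += 1
-- 	return cnt
--
-- def getnumObstacles(obstaclesTop, obstaclesBot, n, lengths):
-- 	if n <= 0:
-- 		return str(lengths) + " 0"
-- 	cntTop = _heightCounts(obstaclesTop, n)
-- 	cntBot = _heightCounts(obstaclesBot, n)
-- 	best = lengths
-- 	occ = 0
-- 	geTop = len(obstaclesTop)  # number of top obstacles of height >= h+1, updated per h
-- 	geBot = 0                  # number of bottom obstacles of height >= n-h, updated per h
-- 	for h in range(n):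
-- 		geTop -= cntTop[h]
-- 		geBot += cntBot[n - h]
-- 		total = geTop + geBot
-- 		if total == best:
-- 			occ += 1
-- 		if total < best:
-- 			best = total
-- 			occ = 1
-- 	return str(best) + " " + str(occ)
-- ===== Notes on version B (the rewrite author's own statement) =====
-- stated objective: faster
-- what changed: Replaces sorting both lists plus a hand-written binary search per height with one clamped counting pass per list and two running prefix/suffix counters updated in O(1) per height.
import Mathlib
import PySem

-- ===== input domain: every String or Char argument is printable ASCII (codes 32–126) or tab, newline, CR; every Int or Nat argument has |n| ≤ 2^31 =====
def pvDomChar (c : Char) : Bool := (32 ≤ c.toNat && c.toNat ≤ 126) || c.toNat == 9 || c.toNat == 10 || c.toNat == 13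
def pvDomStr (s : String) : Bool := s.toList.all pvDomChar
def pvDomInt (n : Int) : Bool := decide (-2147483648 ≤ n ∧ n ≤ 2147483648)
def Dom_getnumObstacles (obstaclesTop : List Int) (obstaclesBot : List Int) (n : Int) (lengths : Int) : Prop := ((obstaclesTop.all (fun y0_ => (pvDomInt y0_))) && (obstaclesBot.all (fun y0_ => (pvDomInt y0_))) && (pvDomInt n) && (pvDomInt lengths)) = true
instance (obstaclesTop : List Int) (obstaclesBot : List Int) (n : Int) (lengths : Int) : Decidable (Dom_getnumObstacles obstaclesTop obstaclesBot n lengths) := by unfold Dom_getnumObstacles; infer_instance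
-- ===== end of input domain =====

-- B replaces A's sort + per-height binary searches by one clamped counting pass per list and
-- two running counters (faster); A sorts its two list arguments in place, B does not mutate
-- them — the equivalence proved here is about the RETURN value only.

-- ===== PORT A =====
-- A's while-loop: low/high shrink until low > high; mid = int((low+high)/2) is truncating division.
-- midpoint bounds, cited by bsLoop's decreasing_by
theorem pvMidBounds (low high : Int) (h : low ≤ high) :
    low ≤ PySem.Int.truncdiv (low + high) 2 ∧ PySem.Int.truncdiv (low + high) 2 ≤ high := by
  simp only [PySem.Int.truncdiv]
  by_cases hpos : 0 ≤ low + high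
  · rw [Int.tdiv_eq_ediv_of_nonneg hpos]; omega
  · have h1 : (low + high).tdiv 2 = -((-(low + high)).tdiv 2) := by
      rw [Int.neg_tdiv]; ring
    rw [h1, Int.tdiv_eq_ediv_of_nonneg (by omega)]
    omega

def bsLoop (obstacles : List Int) (target : Int) (low high : Int) : Int :=
  if h : low ≤ high then
    let mid := PySem.Int.truncdiv (low + high) 2
    if PySem.List.pyGetD obstacles mid 0 ≥ target then
      bsLoop obstacles target low (mid - 1)
    else
      bsLoop obstacles target (mid + 1) high
  else low
termination_by (high + 1 - low).toNat
decreasing_by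
  · have h2 := pvMidBounds low high h
    omega
  · have h2 := pvMidBounds low high h
    omega

def binarysearchIndex (obstacles : List Int) (target : Int) : Int :=
  bsLoop obstacles target 0 (PySem.List.len obstacles - 1)

def getnumObstacles (obstaclesTop : List Int) (obstaclesBot : List Int) (n : Int) (lengths : Int) : String :=
  let sortedTop := PySem.List.sorted obstaclesTop (fun x => x) false
  let sortedBot := PySem.List.sorted obstaclesBot (fun x => x) false
  let res := (PySem.List.pyRange 0 n 1).foldl
    (fun (s : Int × Int) height =>
      let numOccurencesTop := PySem.List.len sortedTop - binarysearchIndex sortedTop (height + 1)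
      let numOccurencesBot := PySem.List.len sortedBot - binarysearchIndex sortedBot (n - height)
      let totalObstacles := numOccurencesTop + numOccurencesBot
      let s := if totalObstacles = s.1 then (s.1, s.2 + 1) else s
      if totalObstacles < s.1 then (totalObstacles, 1) else s)
    (lengths, 0)
  PySem.Str.join " " [PySem.Int.toStr res.1, PySem.Int.toStr res.2]

-- ===== PORT B =====
def heightCounts (obstacles : List Int) (n : Int) : List Int :=
  obstacles.foldl
    (fun cnt v =>
      let c : Int := if v < 0 then 0 else if v > n then n else v
      PySem.List.pySetD cnt c (PySem.List.pyGetD cnt c 0 + 1))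
    (PySem.List.pyRepeat [(0 : Int)] (n + 1))

def getnumObstacles_alt (obstaclesTop : List Int) (obstaclesBot : List Int) (n : Int) (lengths : Int) : String :=
  if n ≤ 0 then PySem.Int.toStr lengths ++ " 0"
  else
    let cntTop := heightCounts obstaclesTop n
    let cntBot := heightCounts obstaclesBot n
    let res := (PySem.List.pyRange 0 n 1).foldl
      (fun (s : Int × Int × Int × Int) h =>
        let geTop := s.1 - PySem.List.pyGetD cntTop h 0
        let geBot := s.2.1 + PySem.List.pyGetD cntBot (n - h) 0
        let total := geTop + geBot
        let occ := if total = s.2.2.1 then s.2.2.2 + 1 else s.2.2.2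
        if total < s.2.2.1 then (geTop, geBot, total, 1) else (geTop, geBot, s.2.2.1, occ))
      (PySem.List.len obstaclesTop, 0, lengths, 0)
    PySem.Int.toStr res.2.2.1 ++ " " ++ PySem.Int.toStr res.2.2.2

-- ===== PRECONDITION & SPEC =====
def Spec_getnumObstacles (obstaclesTop : List Int) (obstaclesBot : List Int) (n : Int) (lengths : Int) (out : String) : Prop := out = getnumObstacles_alt obstaclesTop obstaclesBot n lengths
instance (obstaclesTop : List Int) (obstaclesBot : List Int) (n : Int) (lengths : Int) (out : String) : Decidable (Spec_getnumObstacles obstaclesTop obstaclesBot n lengths out) := by unfold Spec_getnumObstacles; infer_instance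

-- ===== CLAIM (what is proved, stated in full; the proofs are below) =====
def Claim_equal_getnumObstacles : Prop := ∀ (obstaclesTop : List Int) (obstaclesBot : List Int) (n : Int) (lengths : Int), Dom_getnumObstacles obstaclesTop obstaclesBot n lengths → Spec_getnumObstacles obstaclesTop obstaclesBot n lengths (getnumObstacles obstaclesTop obstaclesBot n lengths)


-- ===== LEMMAS AND PROOFS =====

-- the clamped height B's counting pass buckets by
def clampN (n v : Int) : Int := if v < 0 then 0 else if v > n then n else v

def eqC (xs : List Int) (n a : Int) : Nat := xs.countP (fun v => decide (clampN n v = a))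
def ltCl (xs : List Int) (n a : Int) : Nat := xs.countP (fun v => decide (clampN n v < a))
def gtCl (xs : List Int) (n a : Int) : Nat := xs.countP (fun v => decide (a < clampN n v))
def ltV (xs : List Int) (t : Int) : Nat := xs.countP (fun v => decide (v < t))

-- one min/count update, shared shape of both loops
def refStep (tot : Int) (s : Int × Int) : Int × Int :=
  let s' := if tot = s.1 then (s.1, s.2 + 1) else s
  if tot < s'.1 then (tot, 1) else s'

-- the per-height total both programs compute
def refTot (top bot : List Int) (n h : Int) : Int :=
  ((top.length : Int) - (ltV top (h + 1) : Int)) + ((bot.length : Int) - (ltV bot (n - h) : Int))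

def stepA (sortedTop sortedBot : List Int) (n : Int) (s : Int × Int) (height : Int) : Int × Int :=
  let numOccurencesTop := PySem.List.len sortedTop - binarysearchIndex sortedTop (height + 1)
  let numOccurencesBot := PySem.List.len sortedBot - binarysearchIndex sortedBot (n - height)
  let totalObstacles := numOccurencesTop + numOccurencesBot
  let s := if totalObstacles = s.1 then (s.1, s.2 + 1) else s
  if totalObstacles < s.1 then (totalObstacles, 1) else s

def stepB (cntTop cntBot : List Int) (n : Int) (s : Int × Int × Int × Int) (h : Int) : Int × Int × Int × Int :=
  let geTop := s.1 - PySem.List.pyGetD cntTop h 0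
  let geBot := s.2.1 + PySem.List.pyGetD cntBot (n - h) 0
  let total := geTop + geBot
  let occ := if total = s.2.2.1 then s.2.2.2 + 1 else s.2.2.2
  if total < s.2.2.1 then (geTop, geBot, total, 1) else (geTop, geBot, s.2.2.1, occ)

theorem A_eq (top bot : List Int) (n lengths : Int) :
    getnumObstacles top bot n lengths =
      (let r := (PySem.List.pyRange 0 n 1).foldl
        (stepA (PySem.List.sorted top (fun x => x) false) (PySem.List.sorted bot (fun x => x) false) n)
        (lengths, 0)
      PySem.Str.join " " [PySem.Int.toStr r.1, PySem.Int.toStr r.2]) := rfl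

theorem B_eq (top bot : List Int) (n lengths : Int) :
    getnumObstacles_alt top bot n lengths =
      (if n ≤ 0 then PySem.Int.toStr lengths ++ " 0"
      else
        let r := (PySem.List.pyRange 0 n 1).foldl
          (stepB (heightCounts top n) (heightCounts bot n) n)
          (PySem.List.len top, 0, lengths, 0)
        PySem.Int.toStr r.2.2.1 ++ " " ++ PySem.Int.toStr r.2.2.2) := rfl

theorem join_pair (a b : String) : PySem.Str.join " " [a, b] = a ++ " " ++ b := by
  apply String.ext
  simp [PySem.Str.join, PySem.Chars.join, List.intercalate, List.intersperse]

theorem append_space_zero (a : String) : a ++ " " ++ "0" = a ++ " 0" := by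
  apply String.ext
  simp

theorem countP_split_lt (xs : List Int) (f : Int → Int) (a : Int) :
    xs.countP (fun v => decide (f v < a + 1)) =
    xs.countP (fun v => decide (f v < a)) + xs.countP (fun v => decide (f v = a)) := by
  induction xs with
  | nil => simp
  | cons x l ih =>
    simp only [List.countP_cons, ih]
    by_cases h1 : f x < a + 1 <;> by_cases h2 : f x < a <;> by_cases h3 : f x = a <;>
      simp [h1, h2, h3] <;> omega

theorem countP_split_gt (xs : List Int) (f : Int → Int) (a : Int) :
    xs.countP (fun v => decide (a - 1 < f v)) =
    xs.countP (fun v => decide (a < f v)) + xs.countP (fun v => decide (f v = a)) := by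
  induction xs with
  | nil => simp
  | cons x l ih =>
    simp only [List.countP_cons, ih]
    by_cases h1 : a - 1 < f x <;> by_cases h2 : a < f x <;> by_cases h3 : f x = a <;>
      simp [h1, h2, h3] <;> omega

theorem countP_lt_compl (xs : List Int) (t : Int) :
    (xs.countP (fun v => decide (v < t)) : Int) =
      (xs.length : Int) - (xs.countP (fun v => decide (t ≤ v)) : Int) := by
  induction xs with
  | nil => simp
  | cons x l ih =>
    simp only [List.countP_cons, List.length_cons]
    by_cases h1 : x < t <;> by_cases h2 : t ≤ x <;> simp [h1, h2] <;> omega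

theorem ltCl_eq_ltV (xs : List Int) {n a : Int} (h0 : 0 ≤ a) (h : a < n) :
    ltCl xs n (a + 1) = ltV xs (a + 1) := by
  unfold ltCl ltV
  apply List.countP_congr
  intro v _
  simp only [decide_eq_true_eq, clampN]
  split_ifs <;> constructor <;> intro hx <;> omega

theorem gtCl_eq (xs : List Int) {n t : Int} (h1 : 1 ≤ t) (h2 : t ≤ n) :
    gtCl xs n (t - 1) = xs.countP (fun v => decide (t ≤ v)) := by
  unfold gtCl
  apply List.countP_congr
  intro v _
  simp only [decide_eq_true_eq, clampN]
  split_ifs <;> constructor <;> intro hx <;> omega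

theorem ltCl_zero (xs : List Int) {n : Int} (hn : 0 ≤ n) : ltCl xs n 0 = 0 := by
  unfold ltCl
  rw [List.countP_eq_zero]
  intro v _
  simp only [decide_eq_true_eq, clampN]
  split_ifs <;> omega

theorem gtCl_top (xs : List Int) {n : Int} (hn : 0 ≤ n) : gtCl xs n n = 0 := by
  unfold gtCl
  rw [List.countP_eq_zero]
  intro v _
  simp only [decide_eq_true_eq, clampN]
  split_ifs <;> omega

theorem heightCounts_aux (n : Int) (hn : 0 ≤ n) (i : Int) (h0 : 0 ≤ i) (hi : i ≤ n) :
    ∀ (obs acc : List Int), acc.length = (n + 1).toNat →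
      (obs.foldl (fun cnt v =>
          let c : Int := if v < 0 then 0 else if v > n then n else v
          PySem.List.pySetD cnt c (PySem.List.pyGetD cnt c 0 + 1)) acc).length = (n + 1).toNat ∧
      PySem.List.pyGetD (obs.foldl (fun cnt v =>
          let c : Int := if v < 0 then 0 else if v > n then n else v
          PySem.List.pySetD cnt c (PySem.List.pyGetD cnt c 0 + 1)) acc) i 0 =
        PySem.List.pyGetD acc i 0 + (eqC obs n i : Int) := by
  intro obs
  induction obs with
  | nil => intro acc hacc; exact ⟨hacc, by simp [eqC]⟩
  | cons v l ih =>
    intro acc hacc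
    simp only [List.foldl_cons]
    have hlen0 : (PySem.List.pySetD acc (if v < 0 then 0 else if v > n then n else v)
        (PySem.List.pyGetD acc (if v < 0 then 0 else if v > n then n else v) 0 + 1)).length
        = (n + 1).toNat := by
      rw [PySem.List.length_pySetD, hacc]
    obtain ⟨hL, hG⟩ := ih _ hlen0
    refine ⟨hL, ?_⟩
    rw [hG]
    set c : Int := if v < 0 then 0 else if v > n then n else v with hc
    have hc0 : 0 ≤ c := by rw [hc]; split_ifs <;> omega
    have hcn : c ≤ n := by rw [hc]; split_ifs <;> omega
    have hacc' : (acc.length : Int) = n + 1 := by rw [hacc]; omega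
    have hset : PySem.List.pySetD acc c (PySem.List.pyGetD acc c 0 + 1)
        = acc.set c.toNat (PySem.List.pyGetD acc c 0 + 1) := PySem.List.pySetD_of_nonneg _ _ hc0
    have hgi : PySem.List.pyGetD (acc.set c.toNat (PySem.List.pyGetD acc c 0 + 1)) i 0
        = if c.toNat = i.toNat then PySem.List.pyGetD acc c 0 + 1 else acc[i.toNat]'(by omega) := by
      rw [PySem.List.pyGetD_eq_getElem _ 0 h0 (by rw [List.length_set]; omega)]
      rw [List.getElem_set]
    have hgacc : PySem.List.pyGetD acc i 0 = acc[i.toNat]'(by omega) :=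
      PySem.List.pyGetD_eq_getElem _ 0 h0 (by omega)
    have heqc : eqC (v :: l) n i = eqC l n i + if clampN n v = i then 1 else 0 := by
      unfold eqC
      rw [List.countP_cons]
      simp
    have hcv : clampN n v = c := rfl
    rw [hset, hgi, heqc, hgacc, hcv]
    by_cases hci : c = i
    · have : c.toNat = i.toNat := by omega
      rw [if_pos this, if_pos hci]
      have : PySem.List.pyGetD acc c 0 = acc[i.toNat]'(by omega) := by
        rw [hci]; exact hgacc
      rw [this]
      push_cast
      ring
    · have : ¬ c.toNat = i.toNat := by omega
      rw [if_neg this, if_neg hci]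
      push_cast
      ring

theorem heightCounts_getD (obs : List Int) {n i : Int} (hn : 0 ≤ n) (h0 : 0 ≤ i) (hi : i ≤ n) :
    PySem.List.pyGetD (heightCounts obs n) i 0 = (eqC obs n i : Int) := by
  unfold heightCounts
  rw [PySem.List.pyRepeat_singleton]
  rw [(heightCounts_aux n hn i h0 hi obs _ (by simp)).2]
  have : PySem.List.pyGetD (List.replicate (n + 1).toNat (0 : Int)) i 0 = 0 := by
    rw [PySem.List.pyGetD_eq_getElem _ 0 h0 (by simp; omega)]
    simp
  rw [this, zero_add]

theorem countP_threshold (p : Int → Bool) :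
    ∀ (ys : List Int) (m : Nat), m ≤ ys.length →
      (∀ (i : Nat) (h : i < ys.length), p ys[i] = decide (i < m)) → ys.countP p = m := by
  intro ys
  induction ys with
  | nil =>
    intro m hm _
    simp at hm
    simp [hm]
  | cons y l ih =>
    intro m hm hp
    have hy := hp 0 (by simp)
    cases m with
    | zero =>
      simp at hy
      have hz : l.countP p = 0 := List.countP_eq_zero.mpr (by
        intro a ha
        obtain ⟨j, hj, hja⟩ := List.mem_iff_getElem.mp ha
        have := hp (j + 1) (by simpa using Nat.succ_lt_succ hj)
        simp at this
        rw [← hja]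
        simpa using this)
      simp [hz, hy]
    | succ m' =>
      have hyt : p y = true := by simpa using hy
      have hrec : l.countP p = m' := by
        apply ih m' (by simpa using hm)
        intro i hi
        have := hp (i + 1) (by simpa using Nat.succ_lt_succ hi)
        simpa [Nat.succ_lt_succ_iff] using this
      simp [hrec, hyt]

theorem bsExit (ys : List Int) (t low : Int) (h0 : 0 ≤ low) (hl : low ≤ (ys.length : Int))
    (hlt : ∀ (i : Nat) (hi : i < ys.length), (i : Int) < low → ys[i] < t)
    (hge : ∀ (i : Nat) (hi : i < ys.length), low ≤ (i : Int) → t ≤ ys[i]) :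
    low = (ltV ys t : Int) := by
  unfold ltV
  have hth : ys.countP (fun v => decide (v < t)) = low.toNat := by
    apply countP_threshold _ ys low.toNat (by omega)
    intro i hi
    by_cases hil : (i : Int) < low
    · have h1 := hlt i hi hil
      have h2 : i < low.toNat := by omega
      simp [h1, h2]
    · have h1 := hge i hi (by omega)
      have h2 : ¬ i < low.toNat := by omega
      simp [h2]
      omega
  rw [hth]
  omega

theorem bsLoop_eq (ys : List Int) (t : Int)
    (hmono : ∀ (p q : Nat) (hpq : p ≤ q) (hq : q < ys.length), ys[p]'(lt_of_le_of_lt hpq hq) ≤ ys[q]) :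
    ∀ (k : Nat) (low high : Int), (high + 1 - low).toNat ≤ k →
      0 ≤ low → low ≤ high + 1 → high < (ys.length : Int) →
      (∀ (i : Nat) (hi : i < ys.length), (i : Int) < low → ys[i] < t) →
      (∀ (i : Nat) (hi : i < ys.length), high < (i : Int) → t ≤ ys[i]) →
      bsLoop ys t low high = (ltV ys t : Int) := by
  intro k
  induction k with
  | zero =>
    intro low high hk h0 hlh hhl hlt hge
    rw [bsLoop, dif_neg (by omega : ¬ low ≤ high)]
    exact bsExit ys t low h0 (by omega) hlt (fun i hi hli => hge i hi (by omega))
  | succ k ihk =>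
    intro low high hk h0 hlh hhl hlt hge
    by_cases hc : low ≤ high
    · have hmid := pvMidBounds low high hc
      rw [bsLoop, dif_pos hc]
      simp only []
      set mid := PySem.Int.truncdiv (low + high) 2 with hm
      have hm0 : 0 ≤ mid := by omega
      have hmlen : mid < (ys.length : Int) := by omega
      rw [PySem.List.pyGetD_eq_getElem _ _ hm0 hmlen]
      by_cases hv : ys[mid.toNat]'(by omega) ≥ t
      · rw [if_pos hv]
        apply ihk low (mid - 1) (by omega) h0 (by omega) (by omega) hlt
        intro i hi hgt
        have hmi : mid.toNat ≤ i := by omega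
        calc t ≤ ys[mid.toNat]'(by omega) := hv
          _ ≤ ys[i] := hmono mid.toNat i hmi hi
      · rw [if_neg hv]
        apply ihk (mid + 1) high (by omega) (by omega) (by omega) hhl
        · intro i hi hli
          have hmi : i ≤ mid.toNat := by omega
          calc ys[i] ≤ ys[mid.toNat]'(by omega) := hmono i mid.toNat hmi (by omega)
            _ < t := by omega
        · exact hge
    · rw [bsLoop, dif_neg hc]
      exact bsExit ys t low h0 (by omega) hlt (fun i hi hli => hge i hi (by omega))

theorem bsearch_sorted (xs : List Int) (t : Int) :
    binarysearchIndex (PySem.List.sorted xs (fun x => x) false) t = (ltV xs t : Int) := by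
  unfold binarysearchIndex
  rw [PySem.List.len_eq]
  set ys := PySem.List.sorted xs (fun x => x) false with hys
  have hmono : ∀ (p q : Nat) (hpq : p ≤ q) (hq : q < ys.length),
      ys[p]'(lt_of_le_of_lt hpq hq) ≤ ys[q] := by
    intro p q hpq hq
    exact PySem.List.sorted_id_getElem_mono xs hpq hq
  have := bsLoop_eq ys t hmono ys.length 0 ((ys.length : Int) - 1)
    (by omega) le_rfl (by omega) (by omega)
    (by intro i hi hlt; omega)
    (by intro i hi hgt; omega)
  rw [this]
  unfold ltV
  rw [(PySem.List.sorted_perm xs (fun x => x) false).countP_eq]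

theorem foldA_eq_ref (top bot : List Int) (n : Int) (init : Int × Int) :
    (PySem.List.pyRange 0 n 1).foldl
        (stepA (PySem.List.sorted top (fun x => x) false) (PySem.List.sorted bot (fun x => x) false) n) init =
      (PySem.List.pyRange 0 n 1).foldl (fun s h => refStep (refTot top bot n h) s) init := by
  apply PySem.List.foldl_congr_mem
  intro s h _
  unfold stepA refStep refTot
  rw [bsearch_sorted, bsearch_sorted, PySem.List.len_eq, PySem.List.len_eq,
    PySem.List.length_sorted, PySem.List.length_sorted]

theorem loopB (top bot : List Int) (n : Int) (hn : 0 < n) :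
    ∀ (k : Nat) (a : Int), 0 ≤ a → a + (k : Int) = n → ∀ (g1 g2 best occ : Int),
      g1 = (top.length : Int) - (ltCl top n a : Int) →
      g2 = (gtCl bot n (n - a) : Int) →
      ((PySem.List.pyRange a n 1).foldl (stepB (heightCounts top n) (heightCounts bot n) n) (g1, g2, best, occ)).2.2 =
        (PySem.List.pyRange a n 1).foldl (fun s h => refStep (refTot top bot n h) s) (best, occ) := by
  intro k
  induction k with
  | zero =>
    intro a ha hak g1 g2 best occ hg1 hg2
    rw [PySem.List.pyRange_one_eq_nil (by omega : n ≤ a)]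
    simp
  | succ k ih =>
    intro a ha hak g1 g2 best occ hg1 hg2
    have han : a < n := by push_cast at hak; omega
    rw [PySem.List.pyRange_one_cons han]
    simp only [List.foldl_cons]
    have hT : g1 - PySem.List.pyGetD (heightCounts top n) a 0
        = (top.length : Int) - (ltCl top n (a + 1) : Int) := by
      rw [hg1, heightCounts_getD top (by omega) ha (by omega)]
      have hs := countP_split_lt top (clampN n) a
      unfold ltCl eqC at *
      omega
    have hB2 : g2 + PySem.List.pyGetD (heightCounts bot n) (n - a) 0
        = (gtCl bot n (n - (a + 1)) : Int) := by
      rw [hg2, heightCounts_getD bot (by omega) (by omega) (by omega)]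
      have hs := countP_split_gt bot (clampN n) (n - a)
      have h5 : n - (a + 1) = n - a - 1 := by ring
      rw [h5]
      unfold gtCl eqC at *
      omega
    have hTot : ((top.length : Int) - (ltCl top n (a + 1) : Int)) + (gtCl bot n (n - (a + 1)) : Int)
        = refTot top bot n a := by
      unfold refTot
      rw [ltCl_eq_ltV top ha han]
      have h5 : n - (a + 1) = (n - a) - 1 := by ring
      have h6 : (gtCl bot n (n - (a + 1)) : Int) = (bot.length : Int) - (ltV bot (n - a) : Int) := by
        rw [h5, gtCl_eq bot (by omega) (by omega)]
        have h7 := countP_lt_compl bot (n - a)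
        unfold ltV at *
        omega
      omega
    have hstep : stepB (heightCounts top n) (heightCounts bot n) n (g1, g2, best, occ) a
        = ((top.length : Int) - (ltCl top n (a + 1) : Int), (gtCl bot n (n - (a + 1)) : Int),
           (refStep (refTot top bot n a) (best, occ)).1, (refStep (refTot top bot n a) (best, occ)).2) := by
      simp only [stepB, refStep]
      rw [hT, hB2, hTot]
      by_cases he : refTot top bot n a = best <;> by_cases hl : refTot top bot n a < best <;>
        simp [he, hl]
    rw [hstep, ih (a + 1) (by omega) (by push_cast at hak ⊢; omega) _ _ _ _ rfl rfl]


-- ===== VERDICT (by name: the statement is the Claim_ definition above) =====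
theorem getnumObstacles_spec : Claim_equal_getnumObstacles := by
  intro top bot n lengths _
  show getnumObstacles top bot n lengths = getnumObstacles_alt top bot n lengths
  rw [A_eq, B_eq]
  by_cases hn : n ≤ 0
  · rw [if_pos hn, PySem.List.pyRange_one_eq_nil hn]
    simp only [List.foldl_nil]
    rw [join_pair]
    have h0 : PySem.Int.toStr (0 : Int) = "0" := rfl
    rw [h0, append_space_zero]
  · rw [if_neg hn]
    have hpos : 0 < n := by omega
    rw [foldA_eq_ref top bot n (lengths, 0), PySem.List.len_eq]
    have hB := loopB top bot n hpos n.toNat 0 le_rfl (by omega) (top.length : Int) 0 lengths 0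
      (by rw [ltCl_zero top (le_of_lt hpos)]; simp)
      (by rw [(by ring : n - (0 : Int) = n), gtCl_top bot (le_of_lt hpos)]; simp)
    rw [join_pair, ← hB]
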